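-- pv_equiv track=rewrite | github.com/PabloAndresE/SQLens | sqlens/enrichment/domains.py | _detect_domains_by_columns
-- ===== SOURCE A (Python) =====
-- COLUMN_SIGNATURE_PATTERNS: dict[str, list[str]] = {
--     "sales": ["amount", "price", "total", "revenue", "discount", "tax"],
--     "finance": ["debit", "credit", "balance", "ledger"],
--     "users": ["email", "phone", "address", "password_hash", "first_name", "last_name"],
--     "marketing": ["click", "impression", "ctr", "conversion", "utm_"],
--     "analytics": ["event_type", "session_id", "page_view", "referrer"],
-- }
--
-- def _detect_domains_by_columns(column_names: list[str]) -> list[str]: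
--     """Detect domains based on column name signatures."""
--     lower_cols = {c.lower() for c in column_names}
--     domains: list[str] = []
--     for domain, signatures in COLUMN_SIGNATURE_PATTERNS.items():
--         matches = sum(
--             1 for sig in signatures
--             if any(sig in col for col in lower_cols)
--         )
--         if matches >= 2:  # require at least 2 matching columns
--             domains.append(domain)
--     return domains
-- ===== SOURCE B (Python) =====
-- COLUMN_SIGNATURE_PATTERNS: dict[str, list[str]] = {
--     "sales": ["amount", "price", "total", "revenue", "discount", "tax"],
--     "finance": ["debit", "credit", "balance", "ledger"],
--     "users": ["email", "phone", "address", "password_hash", "first_name", "last_name"],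
--     "marketing": ["click", "impression", "ctr", "conversion", "utm_"],
--     "analytics": ["event_type", "session_id", "page_view", "referrer"],
-- }
--
-- def _detect_domains_by_columns(column_names: list[str]) -> list[str]:
--     """Detect domains by searching one flattened haystack instead of scanning columns.
--
--     All lowercased column names are joined into a single newline-separated string;
--     since no signature contains a newline, a signature occurs in the haystack iff
--     it occurs in some column.  Each domain is then judged by substring tests on
--     that one string, with no per-column loop at all.
--     """
--     haystack = "\n".join(c.lower() for c in column_names)
--     domains: list[str] = []
--     for domain, signatures in COLUMN_SIGNATURE_PATTERNS.items():
--         if len([sig for sig in signatures if sig in haystack]) >= 2: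
--             domains.append(domain)
--     return domains
-- ===== Notes on version B (the rewrite author's own statement) =====
-- stated objective: faster
-- what changed: B removes the per-column scan entirely: it flattens all lowercased columns into one newline-joined haystack string and decides each domain by one substring test per signature on that single string (sound because no signature contains a newline), instead of A's per-signature any() generator over the set of columns.
import Mathlib
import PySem

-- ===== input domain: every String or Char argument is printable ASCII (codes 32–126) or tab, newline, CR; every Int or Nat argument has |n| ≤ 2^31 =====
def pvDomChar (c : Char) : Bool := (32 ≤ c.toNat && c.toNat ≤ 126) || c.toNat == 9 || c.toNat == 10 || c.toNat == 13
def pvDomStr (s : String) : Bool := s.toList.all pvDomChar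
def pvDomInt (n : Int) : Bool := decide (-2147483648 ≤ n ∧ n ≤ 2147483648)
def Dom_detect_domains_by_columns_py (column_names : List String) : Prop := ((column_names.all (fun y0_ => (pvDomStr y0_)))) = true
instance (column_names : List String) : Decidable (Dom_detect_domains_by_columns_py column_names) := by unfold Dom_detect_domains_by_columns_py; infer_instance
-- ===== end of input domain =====

-- B flattens all lowercased columns into one newline-joined haystack and tests each signature
-- against that single string (no per-column scan; sound because no signature contains '\n').

-- COLUMN_SIGNATURE_PATTERNS (module constant, shared source text of both programs)
def pvPatterns : List (String × List String) :=
  [("sales", ["amount", "price", "total", "revenue", "discount", "tax"]),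
   ("finance", ["debit", "credit", "balance", "ledger"]),
   ("users", ["email", "phone", "address", "password_hash", "first_name", "last_name"]),
   ("marketing", ["click", "impression", "ctr", "conversion", "utm_"]),
   ("analytics", ["event_type", "session_id", "page_view", "referrer"])]

-- ===== PORT A =====
def detect_domains_by_columns_py (column_names : List String) : List String :=
  let lower_cols : PySem.Set String := PySem.Set.ofList (column_names.map PySem.Str.lower)
  pvPatterns.foldl (fun domains p =>
    let nmatches : Int :=
      ((p.2.filter (fun sig => lower_cols.any (fun col => PySem.Str.isIn sig col))).map
        (fun _ => (1 : Int))).sum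
    if 2 ≤ nmatches then domains ++ [p.1] else domains) []

-- ===== PORT B =====
def detect_domains_by_columns_py_alt (column_names : List String) : List String :=
  let haystack : String := PySem.Str.join "\n" (column_names.map PySem.Str.lower)
  pvPatterns.foldl (fun domains p =>
    if 2 ≤ (p.2.filter (fun sig => PySem.Str.isIn sig haystack)).length then domains ++ [p.1]
    else domains) []

-- ===== PRECONDITION & SPEC =====
def Spec_detect_domains_by_columns_py (column_names : List String) (out : List String) : Prop := out = detect_domains_by_columns_py_alt column_names
instance (column_names : List String) (out : List String) : Decidable (Spec_detect_domains_by_columns_py column_names out) := by unfold Spec_detect_domains_by_columns_py; infer_instance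

-- ===== CLAIM (what is proved, stated in full; the proofs are below) =====
def Claim_equal_detect_domains_by_columns_py : Prop := ∀ (column_names : List String), Dom_detect_domains_by_columns_py column_names → Spec_detect_domains_by_columns_py column_names (detect_domains_by_columns_py column_names)

-- ===== LEMMAS AND PROOFS =====

-- a prefix of l₁ ++ sep :: l₂ that avoids sep is a prefix of l₁
lemma pv_prefix_sep {t l₁ l₂ : List Char} {sep : Char} (hsep : sep ∉ t)
    (h : t <+: l₁ ++ sep :: l₂) : t <+: l₁ := by
  induction t generalizing l₁ with
  | nil => exact List.nil_prefix
  | cons x t' ih =>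
    cases l₁ with
    | nil =>
      rcases List.cons_prefix_cons.mp h with ⟨rfl, -⟩
      exact absurd (List.mem_cons_self ..) hsep
    | cons b l₁' =>
      rcases List.cons_prefix_cons.mp h with ⟨rfl, h'⟩
      exact List.cons_prefix_cons.mpr ⟨rfl, ih (fun hm => hsep (List.mem_cons_of_mem _ hm)) h'⟩

-- an infix of l₁ ++ sep :: l₂ that avoids sep lies entirely in l₁ or in l₂
lemma pv_infix_sep {t : List Char} {sep : Char} (hsep : sep ∉ t) :
    ∀ l₁ l₂ : List Char, t <:+: l₁ ++ sep :: l₂ → t <:+: l₁ ∨ t <:+: l₂ := by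
  intro l₁
  induction l₁ with
  | nil =>
    intro l₂ h
    rcases List.infix_cons_iff.mp h with hp | hi
    · cases t with
      | nil => exact Or.inl (List.infix_refl _)
      | cons x t' =>
        rcases List.cons_prefix_cons.mp hp with ⟨rfl, -⟩
        exact absurd (List.mem_cons_self ..) hsep
    · exact Or.inr hi
  | cons a l₁' ih =>
    intro l₂ h
    rw [List.cons_append, List.infix_cons_iff] at h
    rcases h with hp | hi
    · exact Or.inl (pv_prefix_sep hsep (by simpa using hp)).isInfix
    · rcases ih l₂ hi with h1 | h2
      · exact Or.inl (h1.trans (List.suffix_cons _ _).isInfix)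
      · exact Or.inr h2

-- a nonempty, sep-free word is an infix of the sep-joined list iff it is an infix of some part
lemma pv_infix_join {t : List Char} {sep : Char} (hne : t ≠ []) (hsep : sep ∉ t) :
    ∀ ls : List (List Char), (t <:+: PySem.Chars.join [sep] ls ↔ ∃ l ∈ ls, t <:+: l) := by
  intro ls
  induction ls with
  | nil =>
    rw [PySem.Chars.join_nil]
    simp only [List.mem_nil_iff, false_and, exists_const, iff_false]
    intro h
    exact hne (List.eq_nil_of_infix_nil h)
  | cons p rest ih =>
    cases rest with
    | nil => simp [PySem.Chars.join_singleton]
    | cons q rest' =>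
      rw [PySem.Chars.join_cons_cons]
      constructor
      · intro h
        have h' : t <:+: p ++ sep :: PySem.Chars.join [sep] (q :: rest') := by
          simpa [List.append_assoc] using h
        rcases pv_infix_sep hsep p _ h' with h1 | h2
        · exact ⟨p, List.mem_cons_self .., h1⟩
        · rcases ih.mp h2 with ⟨l, hl, hi⟩
          exact ⟨l, List.mem_cons_of_mem _ hl, hi⟩
      · rintro ⟨l, hl, hi⟩
        rcases List.mem_cons.mp hl with rfl | hl'
        · exact hi.trans ⟨[], [sep] ++ PySem.Chars.join [sep] (q :: rest'), by simp⟩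
        · refine (ih.mpr ⟨l, hl', hi⟩).trans ?_
          exact ((List.suffix_append _ _).isInfix)

-- 'sig in "\n".join(cols)' = 'any(sig in col for col in cols)' for newline-free nonempty sig
lemma pv_isIn_join (sig : String) (cols : List String) (hne : sig.toList ≠ [])
    (hsep : '\n' ∉ sig.toList) :
    PySem.Str.isIn sig (PySem.Str.join "\n" cols) = cols.any (fun col => PySem.Str.isIn sig col) := by
  apply Bool.eq_iff_iff.mpr
  rw [PySem.Str.isIn_iff_infix, PySem.Str.toList_join,
      show ("\n" : String).toList = ['\n'] from rfl, pv_infix_join hne hsep]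
  simp only [List.any_eq_true, PySem.Str.isIn_iff_infix, List.mem_map]
  constructor
  · rintro ⟨l, ⟨c, hc, rfl⟩, hi⟩; exact ⟨c, hc, hi⟩
  · rintro ⟨c, hc, hi⟩; exact ⟨c.toList, ⟨c, hc, rfl⟩, hi⟩

-- any over the deduplicated lowered columns = any over the lowered columns
lemma pv_any_ofList (cols : List String) (sig : String) :
    (PySem.Set.ofList cols).any (fun col => PySem.Str.isIn sig col)
      = cols.any (fun col => PySem.Str.isIn sig col) := by
  apply Bool.eq_iff_iff.mpr
  simp only [List.any_eq_true]
  constructor <;> rintro ⟨c, hc, h⟩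
  · exact ⟨c, (PySem.Set.mem_ofList _ _).mp hc, h⟩
  · exact ⟨c, (PySem.Set.mem_ofList _ _).mpr hc, h⟩

-- ===== VERDICT (by name: the statement is the Claim_ definition above) =====
theorem detect_domains_by_columns_py_spec : Claim_equal_detect_domains_by_columns_py := by
  intro column_names _
  unfold Spec_detect_domains_by_columns_py
  dsimp only [detect_domains_by_columns_py, detect_domains_by_columns_py_alt]
  apply PySem.List.foldl_congr_mem
  intro acc p hp
  have hsig : ∀ q ∈ pvPatterns, ∀ sig ∈ q.2, sig.toList ≠ [] ∧ '\n' ∉ sig.toList := by decide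
  have hfilter : p.2.filter
        (fun sig => (PySem.Set.ofList (column_names.map PySem.Str.lower)).any
          (fun col => PySem.Str.isIn sig col))
      = p.2.filter (fun sig => PySem.Str.isIn sig (PySem.Str.join "\n" (column_names.map PySem.Str.lower))) := by
    apply List.filter_congr
    intro sig hs
    rw [pv_any_ofList, pv_isIn_join sig _ (hsig p hp sig hs).1 (hsig p hp sig hs).2]
  rw [hfilter, PySem.List.sum_map_const_int]
  have hcond : ∀ n : Nat, ((2:Int) ≤ (n : Int) * 1) = (2 ≤ n) := by
    intro n; apply propext; omega
  simp only [hcond]
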